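-- pv_equiv track=rewrite | github.com/dmarl/CATAM | characters/conj.py | ordercl
-- ===== SOURCE A (Python) =====
-- def ordercl(cl):
--     D = dict(cl)
--     classes = []
--     while len(D) > 0:
--         c = [0, 0]
--         for i in D:
--             if len(D[i]) >= c[0]:
--                 c = [len(D[i]), i]
--         classes.append(D[c[1]])
--         del D[c[1]]
--     classdict = {}
--     for i in range(len(classes)):
--         classdict[i] = classes[i]
--     return classdict
-- ===== SOURCE B (Python) =====
-- def ordercl(cl):
--     # Sort once by (-size, -insertion_index) instead of repeatedly scanning for the max:
--     # the -index tie-break reproduces A's `>=` rule (later-inserted class first among equal sizes).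
--     items = list(enumerate(dict(cl).values()))
--     items.sort(key=lambda t: (-len(t[1]), -t[0]))
--     return dict(enumerate([v for _, v in items]))
-- ===== Notes on version B (the rewrite author's own statement) =====
-- stated objective: faster
-- what changed: A repeatedly linear-scans the dict for the largest remaining class and deletes it (selection sort); B enumerates the dict values once and does a single sort keyed on (-size, -insertion index), whose -index tie-break reproduces A's `>=` last-maximum rule.
import Mathlib
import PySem

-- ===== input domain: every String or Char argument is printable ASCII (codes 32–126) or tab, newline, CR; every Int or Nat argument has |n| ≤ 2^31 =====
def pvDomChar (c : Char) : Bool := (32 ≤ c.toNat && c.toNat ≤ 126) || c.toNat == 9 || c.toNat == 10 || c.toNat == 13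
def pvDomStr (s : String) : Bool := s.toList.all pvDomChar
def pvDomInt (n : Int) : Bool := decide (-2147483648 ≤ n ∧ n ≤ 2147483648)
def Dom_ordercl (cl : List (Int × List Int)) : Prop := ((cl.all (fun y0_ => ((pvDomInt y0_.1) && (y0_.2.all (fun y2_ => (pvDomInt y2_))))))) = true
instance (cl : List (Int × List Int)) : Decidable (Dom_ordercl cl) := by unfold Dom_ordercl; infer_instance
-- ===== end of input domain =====

-- B replaces A's quadratic repeated max-scan-and-delete loop by one sort keyed on
-- (-size, -insertion index), which reproduces A's `>=` tie-break; objective: faster.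

-- ===== PORT A =====
-- Termination helpers for the while-loop: the key selected by the inner `for` is a
-- real key of D (the first iteration always fires since lengths are ≥ 0), so `del`
-- strictly shrinks the dict.
theorem pvPick_aux (f : Int → Int) (ks : List Int) : ∀ (acc : Int × Int),
    ((ks.foldl (fun c i => if f i ≥ c.1 then (f i, i) else c) acc).2 = acc.2)
    ∨ ((ks.foldl (fun c i => if f i ≥ c.1 then (f i, i) else c) acc).2 ∈ ks) := by
  induction ks with
  | nil => intro acc; left; rfl
  | cons k t ih =>
    intro acc
    simp only [List.foldl_cons]
    rcases ih (if f k ≥ acc.1 then (f k, k) else acc) with h | h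
    · by_cases hc : f k ≥ acc.1
      · right; rw [h]; simp [hc]
      · left; rw [h]; simp [hc]
    · right; exact List.mem_cons_of_mem _ h

theorem pvPick_mem (f : Int → Int) (hf : ∀ i, 0 ≤ f i) (ks : List Int) (hne : ks ≠ []) :
    (ks.foldl (fun c i => if f i ≥ c.1 then (f i, i) else c) ((0:Int), (0:Int))).2 ∈ ks := by
  cases ks with
  | nil => exact absurd rfl hne
  | cons k t =>
    simp only [List.foldl_cons]
    have h0 : f k ≥ (0:Int) := hf k
    rw [if_pos h0]
    rcases pvPick_aux f t (f k, k) with h | h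
    · rw [h]; exact List.mem_cons_self
    · exact List.mem_cons_of_mem _ h
theorem pvErase_size_lt (D : PySem.Dict Int (List Int)) (k : Int) (hk : k ∈ D.keys) :
    (D.erase k).size < D.size := by
  simp only [PySem.Dict.erase, PySem.Dict.size]
  apply List.length_filter_lt_length_iff_exists.2
  simp only [PySem.Dict.keys, List.mem_map] at hk
  obtain ⟨p, hp, hpk⟩ := hk
  exact ⟨p, hp, by simp [hpk]⟩
def orderclLoop (D : PySem.Dict Int (List Int)) (classes : List (List Int)) : List (List Int) :=
  if h : 0 < D.size then
    let c := D.keys.foldl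
      (fun c i => if ((D.getD i []).length : Int) ≥ c.1 then (((D.getD i []).length : Int), i) else c)
      ((0:Int), (0:Int))
    orderclLoop (D.erase c.2) (classes ++ [D.getD c.2 []])
  else classes
termination_by D.size
decreasing_by
  exact pvErase_size_lt _ _ (pvPick_mem _ (fun i => Int.natCast_nonneg _) _ (by
    intro hnil
    simp [PySem.Dict.size, PySem.Dict.keys] at h hnil
    simp [hnil] at h))

def ordercl (cl : List (Int × List Int)) : List (Int × List Int) :=
  let D := PySem.Dict.ofList cl
  let classes := orderclLoop D []
  -- classdict = {}; for i in range(len(classes)): classdict[i] = classes[i]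
  ((PySem.List.pyRange 0 (classes.length : Int) 1).foldl
      (fun d i => d.insert i (PySem.List.pyGetD classes i [])) PySem.Dict.empty).items

-- ===== PORT B =====
def ordercl_alt (cl : List (Int × List Int)) : List (Int × List Int) :=
  let items := PySem.List.enumerate (PySem.Dict.ofList cl).values 0
  let items := PySem.List.sorted2 items (fun t => -((t.2.length : Int))) (fun t => -t.1) false
  (PySem.Dict.ofList (PySem.List.enumerate (items.map (fun t => t.2)) 0)).items

-- ===== PRECONDITION & SPEC =====
def Spec_ordercl (cl : List (Int × List Int)) (out : List (Int × List Int)) : Prop := out = ordercl_alt cl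
instance (cl : List (Int × List Int)) (out : List (Int × List Int)) : Decidable (Spec_ordercl cl out) := by unfold Spec_ordercl; infer_instance

-- ===== CLAIM (what is proved, stated in full; the proofs are below) =====
def Claim_equal_ordercl : Prop := ∀ (cl : List (Int × List Int)), Dom_ordercl cl → Spec_ordercl cl (ordercl cl)

-- ===== LEMMAS AND PROOFS =====

-- the sort key B uses, as a lexicographic pair
def pvKey (p : Int × List Int) : Lex (Int × Int) := toLex (-((p.2.length : Int)), -p.1)

-- characterisation of A's inner `for` loop over an item list: it returns the length and
-- tag of the LAST element of maximal length
theorem pvPick_char (L : List (Int × List Int)) (hne : L ≠ []) :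
    ∃ (j : Nat) (hj : j < L.length),
      L.foldl (fun c p => if ((p.2.length : Int) ≥ c.1) then (((p.2.length : Int)), p.1) else c)
          ((0:Int), (0:Int))
        = ((L[j].2.length : Int), L[j].1)
      ∧ (∀ i (hi : i < L.length), L[i].2.length ≤ L[j].2.length)
      ∧ (∀ i (hi : i < L.length), j < i → L[i].2.length < L[j].2.length) := by
  induction L using List.reverseRecOn with
  | nil => exact absurd rfl hne
  | append_singleton L p ih =>
    rw [List.foldl_append]
    by_cases hL : L = []
    · subst hL
      refine ⟨0, by simp, ?_, ?_, ?_⟩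
      · simp only [List.nil_append, List.foldl_cons, List.foldl_nil]
        rw [if_pos (by exact_mod_cast Int.natCast_nonneg p.2.length)]
        simp
      · intro i hi
        simp only [List.nil_append, List.length_cons, List.length_nil] at hi
        interval_cases i <;> simp
      · intro i hi h0i
        simp only [List.nil_append, List.length_cons, List.length_nil] at hi
        omega
    · obtain ⟨j, hj, hfold, hle, hlt⟩ := ih hL
      rw [hfold]
      simp only [List.foldl_cons, List.foldl_nil]
      by_cases hc : ((p.2.length : Int) ≥ ((L[j].2.length : Int)))
      · rw [if_pos hc]
        have hLlt : L.length < (L ++ [p]).length := by simp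
        have hp : (L ++ [p])[L.length]'hLlt = p := by simp
        refine ⟨L.length, hLlt, ?_, ?_, ?_⟩
        · rw [hp]
        · intro i hi
          rw [hp]
          rcases Nat.lt_or_ge i L.length with h | h
          · rw [List.getElem_append_left h]
            have := hle i h
            omega
          · have hiL : i = L.length := by
              simp only [List.length_append, List.length_singleton] at hi
              omega
            subst hiL
            rw [hp]
        · intro i hi hgt
          simp only [List.length_append, List.length_singleton] at hi
          omega
      · rw [if_neg hc]
        have hjlt : j < (L ++ [p]).length := by
          rw [List.length_append, List.length_singleton]; omega
        have hp : (L ++ [p])[L.length]'(by simp) = p := by simp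
        refine ⟨j, hjlt, ?_, ?_, ?_⟩
        · rw [List.getElem_append_left hj]
        · intro i hi
          rw [List.getElem_append_left hj]
          rcases Nat.lt_or_ge i L.length with h | h
          · rw [List.getElem_append_left h]; exact hle i h
          · have hiL : i = L.length := by
              simp only [List.length_append, List.length_singleton] at hi
              omega
            subst hiL
            rw [hp]
            omega
        · intro i hi hgt
          rw [List.getElem_append_left hj]
          rcases Nat.lt_or_ge i L.length with h | h
          · rw [List.getElem_append_left h]; exact hlt i h hgt
          · have hiL : i = L.length := by
              simp only [List.length_append, List.length_singleton] at hi
              omega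
            subst hiL
            rw [hp]
            omega

theorem pvFold_keys_items (D : PySem.Dict Int (List Int)) (hnd : D.keys.Nodup) :
    D.keys.foldl
        (fun c i => if ((D.getD i []).length : Int) ≥ c.1 then (((D.getD i []).length : Int), i) else c)
        ((0:Int), (0:Int))
      = D.items.foldl
        (fun c p => if ((p.2.length : Int) ≥ c.1) then (((p.2.length : Int)), p.1) else c)
        ((0:Int), (0:Int)) := by
  have : D.keys = D.items.map (·.1) := rfl
  rw [this, List.foldl_map]
  apply PySem.List.foldl_congr_mem
  intro acc p hp
  obtain ⟨k, v⟩ := p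
  have : D.getD k [] = v := PySem.Dict.getD_of_mem_items D hp hnd []
  rw [this]
theorem pvMap_eraseIdx {α β : Type} (l : List α) (f : α → β) (j : Nat) :
    (l.eraseIdx j).map f = (l.map f).eraseIdx j := by
  simp [List.eraseIdx_eq_take_drop_succ, List.map_take, List.map_drop]
theorem pvPerm_cons_eraseIdx {α : Type} (l : List α) (j : Nat) (hj : j < l.length) :
    l.Perm (l[j] :: l.eraseIdx j) := by
  conv_lhs => rw [← List.take_append_drop j l, ← List.getElem_cons_drop hj]
  rw [List.eraseIdx_eq_take_drop_succ]
  exact List.perm_middle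
theorem pvFilter_eraseIdx (L : List (Int × List Int)) (hnd : (L.map (·.1)).Nodup)
    (j : Nat) (hj : j < L.length) :
    L.filter (fun p => !(p.1 == L[j].1)) = L.eraseIdx j := by
  induction L generalizing j with
  | nil => simp at hj
  | cons q t ih =>
    simp only [List.map_cons, List.nodup_cons, List.mem_map] at hnd
    cases j with
    | zero =>
      simp only [List.getElem_cons_zero, List.eraseIdx_cons_zero, List.filter_cons]
      simp only [beq_self_eq_true, Bool.not_true, if_neg (by simp : ¬ (false = true))]
      apply List.filter_eq_self.2
      intro p hp
      simp only [Bool.not_eq_true', beq_eq_false_iff_ne, ne_eq]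
      intro hpq
      exact hnd.1 ⟨p, hp, hpq⟩
    | succ j =>
      have hj' : j < t.length := by simpa using hj
      simp only [List.getElem_cons_succ, List.eraseIdx_cons_succ, List.filter_cons]
      have hne : q.1 ≠ t[j].1 := by
        intro h
        exact hnd.1 ⟨t[j], List.getElem_mem hj', h.symm⟩
      have hb : (!(q.1 == t[j].1)) = true := by simp [hne]
      rw [hb, if_pos rfl, ih hnd.2 j hj']
theorem pvMain : ∀ (n : Nat) (D : PySem.Dict Int (List Int)) (E : List (Int × List Int))
    (classes : List (List Int)),
    D.size = n → D.keys.Nodup → E.map (·.2) = D.values → E.Pairwise (fun a b => a.1 < b.1) →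
    ∃ P : List (Int × List Int), P.Perm E ∧
      P.Pairwise (fun a b => pvKey a < pvKey b) ∧
      orderclLoop D classes = classes ++ P.map (·.2) := by
  intro n
  induction n using Nat.strong_induction_on with
  | _ n ih =>
    intro D E classes hsize hnd hval hpw
    by_cases hpos : 0 < D.size
    · -- while-loop body runs
      have hne : D.items ≠ [] := by
        intro h
        simp [PySem.Dict.size, h] at hpos
      obtain ⟨j, hj, hfold, hle, hlt⟩ := pvPick_char D.items hne
      have hkeys := (pvFold_keys_items D hnd).trans hfold
      have hlenE : E.length = D.items.length := by
        have := congrArg List.length hval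
        simpa [PySem.Dict.values] using this
      have hjE : j < E.length := by omega
      have hsnd : ∀ i (hi : i < E.length), E[i].2 = D.items[i].2 := by
        intro i hi
        have h3 : (E.map (·.2))[i]? = (D.items.map (·.2))[i]? := by
          rw [hval]; rfl
        rw [List.getElem?_map, List.getElem?_map, List.getElem?_eq_getElem hi,
            List.getElem?_eq_getElem (by omega : i < D.items.length)] at h3
        simpa using h3
      have hitem : (D.items[j].1, D.items[j].2) ∈ D.items := by
        simpa using List.getElem_mem hj
      have hlook : D.getD D.items[j].1 [] = D.items[j].2 :=
        PySem.Dict.getD_of_mem_items D hitem hnd []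
      have herase : (D.erase D.items[j].1).items = D.items.eraseIdx j :=
        pvFilter_eraseIdx D.items hnd j hj
      have hsize' : (D.erase D.items[j].1).size = n - 1 := by
        have h1 : (D.erase D.items[j].1).size = (D.items.eraseIdx j).length := by
          simp [PySem.Dict.size, herase]
        rw [h1, List.length_eraseIdx_of_lt hj]
        simp only [PySem.Dict.size] at hsize
        omega
      have hnd' : (D.erase D.items[j].1).keys.Nodup := by
        have hk : (D.erase D.items[j].1).keys = D.keys.eraseIdx j := by
          show ((D.erase D.items[j].1).items).map (·.1) = _
          rw [herase, pvMap_eraseIdx]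
          rfl
        rw [hk]
        exact hnd.sublist (List.eraseIdx_sublist _ _)
      have hval' : (E.eraseIdx j).map (·.2) = (D.erase D.items[j].1).values := by
        show _ = ((D.erase D.items[j].1).items).map (·.2)
        rw [herase, pvMap_eraseIdx, pvMap_eraseIdx, hval]
        rfl
      have hpw' : (E.eraseIdx j).Pairwise (fun a b => a.1 < b.1) :=
        hpw.sublist (List.eraseIdx_sublist _ _)
      obtain ⟨P', hperm', hpw2', hloop'⟩ := ih (n - 1) (by omega) (D.erase D.items[j].1)
        (E.eraseIdx j) (classes ++ [D.getD D.items[j].1 []]) hsize' hnd' hval' hpw'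
      refine ⟨E[j] :: P', ?_, ?_, ?_⟩
      · exact (hperm'.cons E[j]).trans (pvPerm_cons_eraseIdx E j hjE).symm
      · constructor
        · intro q hq
          have hqE : q ∈ E.eraseIdx j := (hperm'.mem_iff).1 hq
          obtain ⟨i, hi, hij, hEq⟩ := List.mem_eraseIdx_iff_getElem.1 hqE
          subst hEq
          simp only [pvKey, Prod.Lex.toLex_lt_toLex]
          have hEj : E[j].2.length = D.items[j].2.length := by rw [hsnd j hjE]
          have hEi : E[i].2.length = D.items[i].2.length := by rw [hsnd i hi]
          rcases Nat.lt_or_ge j i with h | h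
          · have := hlt i (by omega) h
            left
            omega
          · have h' : i < j := by omega
            have h2 := hle i (by omega)
            rcases Nat.lt_or_ge D.items[i].2.length D.items[j].2.length with h3 | h3
            · left; omega
            · right
              constructor
              · omega
              · have := (List.pairwise_iff_getElem.1 hpw) i j hi hjE h'
                omega
        · exact hpw2'
      · rw [orderclLoop, dif_pos hpos]
        simp only [hkeys]
        rw [hloop', hlook]
        have hvj : E[j].2 = D.items[j].2 := hsnd j hjE
        rw [← hvj]
        simp [List.append_assoc]
    · -- dict exhausted
      have hD : D.items = [] := by
        simp only [PySem.Dict.size, Nat.pos_iff_ne_zero, ne_eq, not_not] at hpos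
        exact List.length_eq_zero_iff.1 hpos
      have hE : E = [] := by
        have h : E.map (·.2) = [] := by
          rw [hval]
          simp [PySem.Dict.values, hD]
        exact List.map_eq_nil_iff.1 h
      refine ⟨[], by simp [hE], by simp, ?_⟩
      rw [orderclLoop, dif_neg hpos]
      simp

theorem pvInsertBy_congr {α : Type} (f g : α → α → Bool) (h : ∀ a b, f a b = g a b)
    (x : α) (l : List α) : PySem.List.insertBy f x l = PySem.List.insertBy g x l := by
  induction l with
  | nil => rfl
  | cons y ys ih =>
    simp only [PySem.List.insertBy, h x y] at *
    by_cases hg : g x y = true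
    · simp [hg]
    · simp [hg]; exact ih
theorem pvSorted2_eq (xs : List (Int × List Int)) :
    PySem.List.sorted2 xs (fun t => -((t.2.length : Int))) (fun t => -t.1) false
      = PySem.List.sorted xs pvKey false := by
  simp only [PySem.List.sorted2, PySem.List.sorted, if_neg (by decide : ¬ (false = true))]
  apply PySem.List.foldl_congr_mem
  intro acc x _
  apply pvInsertBy_congr
  intro a b
  simp only [pvKey, Prod.Lex.toLex_lt_toLex]
  by_cases h1 : (-((a.2.length : Int))) < (-((b.2.length : Int)))
  · simp [h1]
  · by_cases h2 : (-((b.2.length : Int))) < (-((a.2.length : Int)))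
    · simp [h1, h2]
      omega
    · have he : (-((a.2.length : Int))) = (-((b.2.length : Int))) := by omega
      simp [he]
theorem pvRangeDict (classes : List (List Int)) :
    ((PySem.List.pyRange 0 (classes.length : Int) 1).foldl
        (fun d i => d.insert i (PySem.List.pyGetD classes i [])) PySem.Dict.empty).items
      = PySem.List.enumerate classes 0 := by
  rw [PySem.Dict.items_foldl_insert_fresh (k := fun i => i) (v := fun i => PySem.List.pyGetD classes i [])
      (d := PySem.Dict.empty) _ (by intro a _; simp [PySem.Dict.contains_empty]) (by simpa using PySem.List.nodup_pyRange_one 0 (classes.length : Int))]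
  rw [PySem.List.enumerate_eq_map_pyRange (d := [])]
  simp [PySem.Dict.empty]
theorem pvOfList_enumerate (vs : List (List Int)) :
    (PySem.Dict.ofList (PySem.List.enumerate vs 0)).items = PySem.List.enumerate vs 0 := by
  show ((PySem.List.enumerate vs 0).foldl (fun acc p => acc.insert p.1 p.2) PySem.Dict.empty).items = _
  have h := PySem.Dict.items_foldl_insert_fresh (l := PySem.List.enumerate vs 0)
      (k := fun p : Int × List Int => p.1) (v := fun p : Int × List Int => p.2)
      (d := PySem.Dict.empty) (by intro a _; simp [PySem.Dict.contains_empty])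
      (by rw [PySem.List.map_fst_enumerate]; simpa using PySem.List.nodup_pyRange_one 0 (vs.length : Int))
  simpa using h
theorem ordercl_spec : Claim_equal_ordercl := by
  unfold Claim_equal_ordercl
  intro cl _
  unfold Spec_ordercl ordercl ordercl_alt
  obtain ⟨P, hperm, hpw, hloop⟩ := pvMain (PySem.Dict.ofList cl).size (PySem.Dict.ofList cl)
      (PySem.List.enumerate (PySem.Dict.ofList cl).values 0) [] rfl
      (PySem.Dict.nodup_keys_ofList cl) (PySem.List.map_snd_enumerate _ _)
      (PySem.List.pairwise_lt_enumerate _ _)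
  have hsorted : PySem.List.sorted (PySem.List.enumerate (PySem.Dict.ofList cl).values 0) pvKey false = P :=
    PySem.List.sorted_eq_of_perm_of_pairwise_lt _ _ _ hperm hpw
  simp only [pvRangeDict, pvSorted2_eq, pvOfList_enumerate, hsorted, hloop, List.nil_append]
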